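-- pv_equiv track=rewrite | github.com/mathelai/github.io | imo2012p3/simulation.py | optimal_strategy_b
-- ===== SOURCE A (Python) =====
-- from typing import List, Set, Tuple, Dict, Any
--
-- def optimal_strategy_b(k: int, N: int) -> Tuple[List[Set[int]], int]:
--     """
--     Implement an optimal strategy for player B.
--
--     The key insight for part (a): B can use a strategy where each question
--     reduces the number of possible values. After asking enough questions,
--     B can narrow down to at most 2^k possibilities.
--
--     Strategy: Ask questions about carefully chosen sets to maximize information gain
--     even with lies.
--     """
--     questions = []
--
--     # We'll use a base-2 representation strategy
--     # Ask k+1 questions for each bit position to ensure we get at least one truth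
--
--     num_bits = 0
--     temp = N - 1
--     while temp > 0:
--         num_bits += 1
--         temp //= 2
--
--     # For each bit position, ask k+1 times about numbers with that bit set
--     for bit in range(num_bits):
--         for _ in range(k + 1):
--             # Create set of numbers with this bit set in their binary representation
--             S = set()
--             for num in range(1, N + 1):
--                 if (num - 1) & (1 << bit):
--                     S.add(num)
--             if S:
--                 questions.append(S)
--
--     return questions, 2 ** k
-- ===== SOURCE B (Python) =====
-- def optimal_strategy_b(k, N):
--     # One pass over 1..N populates a per-bit table; questions are emitted from the table.
--     num_bits = (N - 1).bit_length() if N - 1 > 0 else 0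
--     table = [[] for _ in range(num_bits)]
--     for num in range(1, N + 1):
--         bits = num - 1
--         b = 0
--         while bits:
--             if bits & 1:
--                 table[b].append(num)
--             bits >>= 1
--             b += 1
--     questions = []
--     for bit in range(num_bits):
--         for _ in range(k + 1):
--             questions.append(set(table[bit]))
--     return questions, 2 ** k
-- ===== Notes on version B (the rewrite author's own statement) =====
-- stated objective: alternative
-- what changed: A rebuilds each question set by rescanning all of 1..N for every bit and every one of the k+1 repetitions; B makes a single pass over 1..N filing each number under its set bits in a per-bit table, then emits the k+1 copies per bit from the table.
-- outside the precondition, e.g. on optimal_strategy_b(-1, 5): A returns ([], 0.5), B returns ([], 0.5); on optimal_strategy_b(-2147483647, 2147483648): A returns ([], 0.0), B does not finish within the time limit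
import Mathlib
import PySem

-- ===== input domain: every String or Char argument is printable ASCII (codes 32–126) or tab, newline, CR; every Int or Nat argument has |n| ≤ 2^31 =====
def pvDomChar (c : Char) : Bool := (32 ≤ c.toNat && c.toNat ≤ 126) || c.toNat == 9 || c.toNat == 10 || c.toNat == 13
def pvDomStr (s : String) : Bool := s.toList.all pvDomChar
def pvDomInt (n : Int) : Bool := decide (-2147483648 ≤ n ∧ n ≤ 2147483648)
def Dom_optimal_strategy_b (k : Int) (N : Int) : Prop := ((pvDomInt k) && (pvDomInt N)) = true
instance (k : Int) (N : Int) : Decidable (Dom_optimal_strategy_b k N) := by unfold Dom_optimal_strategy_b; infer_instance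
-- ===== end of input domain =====

-- B replaces A's per-question rescan of 1..N by a single populating pass that files each
-- number under its set bits once, then emits the k+1 copies per bit from that table (objective: alternative).

-- ===== PORT A =====
-- 'num_bits = 0; temp = N - 1; while temp > 0: num_bits += 1; temp //= 2'
def pvNumBitsLoop (temp : Int) (acc : Int) : Int :=
  if 0 < temp then pvNumBitsLoop (PySem.Int.floordiv temp 2) (acc + 1) else acc
termination_by temp.toNat
decreasing_by
  rw [PySem.Int.floordiv_eq_ediv_of_pos (by omega : (0:Int) < 2)]; omega

-- the body of A's innermost loop: 'S = set(); for num in range(1, N+1): if (num-1) & (1 << bit): S.add(num)'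
-- (bit ≥ 0 on every iteration, so '1 << bit' is '1 <<< bit.toNat')
def pvAskSet (N : Int) (bit : Int) : PySem.Set Int :=
  (PySem.List.pyRange 1 (N + 1) 1).foldl (fun S num =>
    if PySem.Int.band (num - 1) ((1:Int) <<< bit.toNat) ≠ 0 then PySem.Set.add S num else S)
    PySem.Set.empty

def optimal_strategy_b (k : Int) (N : Int) : List (List Int) × Int :=
  let numBits := pvNumBitsLoop (N - 1) 0
  let questions :=
    (PySem.List.pyRange 0 numBits 1).foldl (fun qs bit =>
      (PySem.List.pyRange 0 (k + 1) 1).foldl (fun qs _ =>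
        let S : PySem.Set Int := pvAskSet N bit
        if S ≠ [] then qs ++ [S] else qs) qs) []
  -- '2 ** k': exact for k ≥ 0 (Pre_; Python returns a float for k < 0)
  (questions, 2 ^ k.toNat)

-- ===== PORT B =====
-- 'bits = num - 1; b = 0; while bits: if bits & 1: table[b].append(num); bits >>= 1; b += 1'
-- (bits = num - 1 ≥ 0 on every call, carried as a Nat; b < len(table) on every reachable
--  iteration, so List.set is exact here)
def pvFillBits (table : List (List Int)) (num : Int) (bits : Nat) (b : Nat) : List (List Int) :=
  if bits ≠ 0 then
    let table' := if bits &&& 1 ≠ 0 then table.set b ((table.getD b []) ++ [num]) else table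
    pvFillBits table' num (bits >>> 1) (b + 1)
  else table
termination_by bits
decreasing_by simp [Nat.shiftRight_one]; omega

def optimal_strategy_b_alt (k : Int) (N : Int) : List (List Int) × Int :=
  let numBits : Nat := if 0 < N - 1 then PySem.Int.bitLength (N - 1) else 0
  let table := (PySem.List.pyRange 1 (N + 1) 1).foldl
      (fun table num => pvFillBits table num (num - 1).toNat 0)
      (List.replicate numBits [])
  let questions :=
    (PySem.List.pyRange 0 (numBits : Int) 1).foldl (fun qs bit =>
      (PySem.List.pyRange 0 (k + 1) 1).foldl (fun qs _ =>
        -- 'set(table[bit])': bit ∈ range(numBits) so 0 ≤ bit < len(table)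
        qs ++ [PySem.Set.ofList (table.getD bit.toNat [])]) qs) []
  (questions, 2 ^ k.toNat)

-- ===== PRECONDITION & SPEC =====
-- Pre_ excludes k < 0, where '2 ** k' makes both programs return a float, not an int.
def Pre_optimal_strategy_b (k : Int) (N : Int) : Prop := 0 ≤ k
instance (k : Int) (N : Int) : Decidable (Pre_optimal_strategy_b k N) := by unfold Pre_optimal_strategy_b; infer_instance
def pvWitness_optimal_strategy_b : Int × Int := (1, 5)

def Spec_optimal_strategy_b (k : Int) (N : Int) (out : List (List Int) × Int) : Prop := out = optimal_strategy_b_alt k N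
instance (k : Int) (N : Int) (out : List (List Int) × Int) : Decidable (Spec_optimal_strategy_b k N out) := by unfold Spec_optimal_strategy_b; infer_instance

-- ===== CLAIM (what is proved, stated in full; the proofs are below) =====
def Claim_equal_optimal_strategy_b : Prop := ∀ (k : Int) (N : Int), Dom_optimal_strategy_b k N → Pre_optimal_strategy_b k N → Spec_optimal_strategy_b k N (optimal_strategy_b k N)

-- ===== LEMMAS AND PROOFS =====

-- A's num_bits halving loop computes bit_length
theorem pvNumBitsLoop_eq (t acc : Int) (h : 0 < t) :
    pvNumBitsLoop t acc = acc + PySem.Int.bitLength t := by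
  have hfd : PySem.Int.floordiv t 2 = t / 2 := PySem.Int.floordiv_eq_ediv_of_pos (by omega)
  rw [pvNumBitsLoop, if_pos h, PySem.Int.bitLength_of_pos h]
  by_cases h2 : 0 < PySem.Int.floordiv t 2
  · have : (PySem.Int.floordiv t 2).toNat < t.toNat := by rw [hfd] at *; omega
    rw [pvNumBitsLoop_eq _ _ h2]; push_cast; ring
  · have ht1 : PySem.Int.floordiv t 2 = 0 := by rw [hfd] at *; omega
    rw [ht1, pvNumBitsLoop, if_neg (by omega)]
    simp [PySem.Int.bitLength_zero]
termination_by t.toNat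
decreasing_by rw [PySem.Int.floordiv_eq_ediv_of_pos (by omega : (0:Int) < 2)] at *; omega

-- the guarded Set.add fold of A's inner loop, over a duplicate-free list fresh to the
-- accumulator, is a filter
theorem foldl_set_add_filter (P : Int → Bool) (l : List Int) (acc : PySem.Set Int)
    (hnd : l.Nodup) (hdisj : ∀ x ∈ l, x ∉ acc) :
    l.foldl (fun S num => if P num then PySem.Set.add S num else S) acc = acc ++ l.filter P := by
  induction l generalizing acc with
  | nil => simp
  | cons x xs ih =>
    simp only [List.foldl_cons, List.filter_cons]
    rcases List.nodup_cons.mp hnd with ⟨hx, hnd'⟩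
    by_cases hp : P x
    · rw [hp, if_pos rfl, if_pos rfl,
        PySem.Set.add_of_not_mem (hdisj x (by simp)),
        ih _ hnd' (by
          intro y hy
          simp only [List.mem_append, List.mem_singleton, not_or]
          exact ⟨hdisj y (by simp [hy]), fun h => hx (h ▸ hy)⟩)]
      simp
    · rw [if_neg (by simp [hp]), if_neg (by simp [hp]),
        ih _ hnd' (fun y hy => hdisj y (by simp [hy]))]

theorem getD_set_ne (table : List (List Int)) (v : List Int) (b j : Nat) (h : j ≠ b) :
    (table.set b v).getD j [] = table.getD j [] := by
  by_cases hjl : j < table.length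
  · simp [List.getD, List.getElem?_set_ne (fun hh => h hh.symm)]
  · simp [List.getD, List.getElem?_eq_none (show table.length ≤ j by omega),
      List.getElem?_eq_none (show (table.set b v).length ≤ j by simp; omega)]

theorem testBit_half (bits b j : Nat) (hj : b + 1 ≤ j) :
    bits.testBit (j - b) = (bits >>> 1).testBit (j - (b+1)) := by
  have h1 : j - b = (j - (b+1)) + 1 := by omega
  rw [h1, Nat.testBit_succ, ← Nat.shiftRight_one]

-- pvFillBits appends num to entry j exactly when bit (j - b) of bits is set
theorem pvFillBits_getD (table : List (List Int)) (num : Int) (bits b j : Nat) :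
    (pvFillBits table num bits b).getD j [] =
      if b ≤ j ∧ bits.testBit (j - b) ∧ j < table.length then table.getD j [] ++ [num]
      else table.getD j [] := by
  by_cases h0 : bits ≠ 0
  · rw [pvFillBits, if_pos h0]
    show (pvFillBits (if bits &&& 1 ≠ 0 then table.set b ((table.getD b []) ++ [num]) else table)
        num (bits >>> 1) (b + 1)).getD j [] = _
    rw [pvFillBits_getD]
    by_cases hb1 : bits &&& 1 ≠ 0
    · rw [if_pos hb1]; simp only [List.length_set]
      have htb0 : bits.testBit 0 = true := by
        simpa [Nat.and_one_is_mod, Nat.testBit_zero] using hb1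
      by_cases hj : b + 1 ≤ j
      · rw [getD_set_ne table _ b j (by omega), ← testBit_half bits b j hj]
        by_cases hrest : bits.testBit (j - b) ∧ j < table.length
        · rw [if_pos ⟨hj, hrest.1, hrest.2⟩, if_pos ⟨by omega, hrest.1, hrest.2⟩]
        · rw [if_neg (by tauto), if_neg (by tauto)]
      · rw [if_neg (fun h => hj h.1)]
        by_cases hjb : j = b
        · subst hjb
          by_cases hjl : j < table.length
          · rw [if_pos ⟨le_refl j, by simpa using htb0, hjl⟩]
            simp [List.getD, List.getElem?_set_self hjl, List.getElem?_eq_getElem hjl]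
          · rw [if_neg (by tauto)]
            rw [List.set_eq_of_length_le (by omega)]
        · rw [getD_set_ne table _ b j hjb, if_neg (by omega)]
    · rw [if_neg hb1]
      have htb0 : bits.testBit 0 = false := by
        simp only [ne_eq, not_not] at hb1
        simpa [Nat.and_one_is_mod, Nat.testBit_zero] using hb1
      by_cases hj : b + 1 ≤ j
      · rw [← testBit_half bits b j hj]
        by_cases hrest : bits.testBit (j - b) ∧ j < table.length
        · rw [if_pos ⟨hj, hrest.1, hrest.2⟩, if_pos ⟨by omega, hrest.1, hrest.2⟩]
        · rw [if_neg (by tauto), if_neg (by tauto)]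
      · rw [if_neg (fun h => hj h.1)]
        by_cases hjb : j = b
        · subst hjb
          rw [if_neg (by simp [htb0])]
        · rw [if_neg (by omega)]
  · rw [pvFillBits, if_neg h0]
    simp only [ne_eq, not_not] at h0
    simp [h0]
termination_by bits
decreasing_by simp [Nat.shiftRight_one]; omega

theorem pvFillBits_length (table : List (List Int)) (num : Int) (bits b : Nat) :
    (pvFillBits table num bits b).length = table.length := by
  rw [pvFillBits]
  split
  · rw [pvFillBits_length]
    split <;> simp
  · rfl
termination_by bits
decreasing_by simp [Nat.shiftRight_one]; omega

-- B's table fold accumulates, per bit position, the filtered numbers in order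
theorem table_fold_spec (l : List Int) (table : List (List Int)) :
    ((l.foldl (fun table num => pvFillBits table num (num - 1).toNat 0) table).length = table.length) ∧
    (∀ j < table.length,
      (l.foldl (fun table num => pvFillBits table num (num - 1).toNat 0) table).getD j [] =
        table.getD j [] ++ l.filter (fun num => (num - 1).toNat.testBit j)) := by
  induction l generalizing table with
  | nil => simp
  | cons x xs ih =>
    simp only [List.foldl_cons, List.filter_cons]
    obtain ⟨ihlen, ihgd⟩ := ih (pvFillBits table x (x - 1).toNat 0)
    refine ⟨by rw [ihlen, pvFillBits_length], ?_⟩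
    intro j hj
    rw [ihgd j (by rw [pvFillBits_length]; exact hj), pvFillBits_getD]
    by_cases hb : (x - 1).toNat.testBit j
    · rw [if_pos ⟨Nat.zero_le j, by rw [Nat.sub_zero]; exact hb, hj⟩]
      simp only [hb, if_true, List.append_assoc, List.singleton_append]
    · rw [if_neg (fun h => hb ((Nat.sub_zero j) ▸ h.2.1))]
      rw [Bool.not_eq_true] at hb
      simp only [hb, Bool.false_eq_true, if_false]

-- A's membership test is the testBit predicate, for num ≥ 1
theorem band_test_eq (num : Int) (bit : Nat) (h : 1 ≤ num) :
    (decide (PySem.Int.band (num - 1) ((1:Int) <<< bit) ≠ 0)) = (num - 1).toNat.testBit bit := by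
  have h1 : (1:Int) <<< bit = ((1 <<< bit : Nat) : Int) := by simp [Int.shiftLeft_eq, Nat.shiftLeft_eq]
  have h2 : (num - 1) = ((num - 1).toNat : Int) := by omega
  rw [h1, h2, PySem.Int.band_natCast]
  simp [Nat.shiftLeft_eq, Nat.and_two_pow]

-- every per-bit filter below num_bits is nonempty (2^j + 1 is in it)
theorem filter_ne_nil (N : Int) (j : Nat) (hN : 0 < N - 1) (hj : j < PySem.Int.bitLength (N - 1)) :
    (PySem.List.pyRange 1 (N+1) 1).filter (fun num => (num - 1).toNat.testBit j) ≠ [] := by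
  have hm : 0 < 2 ^ j := Nat.two_pow_pos j
  have hle : 2 ^ j ≤ (N - 1).toNat := by
    have h1 := PySem.Int.two_pow_bitLength_le (N - 1) (by omega)
    have h2 : 2 ^ j ≤ 2 ^ (PySem.Int.bitLength (N - 1) - 1) := Nat.pow_le_pow_right (by omega) (by omega)
    omega
  apply List.ne_nil_of_mem (a := ((2 ^ j : Nat) : Int) + 1)
  rw [List.mem_filter]
  constructor
  · exact (PySem.List.mem_pyRange_one).mpr ⟨by omega, by omega⟩
  · have hw : (((2 ^ j : Nat) : Int) + 1 - 1).toNat = 2 ^ j := by omega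
    rw [hw]
    simp [Nat.testBit_two_pow_self]

-- ===== VERDICT (by name: the statement is the Claim_ definition above) =====
theorem optimal_strategy_b_spec : Claim_equal_optimal_strategy_b := by
  intro k N _ hk
  unfold Spec_optimal_strategy_b optimal_strategy_b optimal_strategy_b_alt
  set nb : Nat := if 0 < N - 1 then PySem.Int.bitLength (N - 1) else 0 with hnbdef
  set F : Nat → List Int :=
    fun j => (PySem.List.pyRange 1 (N+1) 1).filter (fun num => (num - 1).toNat.testBit j) with hFdef
  -- num_bits agree
  have hnb : pvNumBitsLoop (N - 1) 0 = (nb : Int) := by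
    by_cases hN : 0 < N - 1
    · rw [pvNumBitsLoop_eq _ _ hN, hnbdef, if_pos hN]; simp
    · rw [pvNumBitsLoop, if_neg hN, hnbdef, if_neg hN]; simp
  -- the table entries are the per-bit filters
  have htbl := table_fold_spec (PySem.List.pyRange 1 (N+1) 1) (List.replicate nb [])
  have hrep : ∀ j : Nat, (List.replicate nb ([] : List Int)).getD j [] = [] := by
    intro j; simp [List.getD, List.getElem?_replicate]; split <;> simp
  have htable : ∀ j : Nat, j < nb →
      ((PySem.List.pyRange 1 (N+1) 1).foldl
        (fun table num => pvFillBits table num (num - 1).toNat 0)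
        (List.replicate nb [])).getD j [] = F j := by
    intro j hj
    rw [htbl.2 j (by simpa using hj), hrep]
    simp [hFdef]
  -- A's inner accumulation builds exactly the filter
  have hSA : ∀ bit : Int, 0 ≤ bit → pvAskSet N bit = F bit.toNat := by
    intro bit _
    rw [pvAskSet]
    have hcg : (PySem.List.pyRange 1 (N + 1) 1).foldl (fun S num =>
          if PySem.Int.band (num - 1) ((1:Int) <<< bit.toNat) ≠ 0 then PySem.Set.add S num else S)
        PySem.Set.empty =
        (PySem.List.pyRange 1 (N + 1) 1).foldl (fun S num =>
          if (num - 1).toNat.testBit bit.toNat then PySem.Set.add S num else S)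
        PySem.Set.empty := by
      apply PySem.List.foldl_congr_mem
      intro acc x hx
      have hx1 : 1 ≤ x := ((PySem.List.mem_pyRange_one).mp hx).1
      have hd := band_test_eq x bit.toNat hx1
      by_cases hb : (x - 1).toNat.testBit bit.toNat
      · rw [if_pos (of_decide_eq_true (by rw [hd]; exact hb)), if_pos hb]
      · rw [if_neg (fun hp => hb (hd ▸ decide_eq_true hp)), if_neg hb]
    rw [hcg, foldl_set_add_filter _ _ _ (PySem.List.nodup_pyRange_one 1 (N+1)) (by simp [PySem.Set.empty])]
    simp [hFdef]
  -- filters below nb are nonempty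
  have hFne : ∀ j : Nat, j < nb → F j ≠ [] := by
    intro j hj
    by_cases hN : 0 < N - 1
    · exact filter_ne_nil N j hN (by rw [hnbdef, if_pos hN] at hj; exact hj)
    · rw [hnbdef, if_neg hN] at hj; omega
  -- both question lists coincide with the canonical emission from the filters
  rw [hnb]
  refine Prod.ext ?_ rfl
  show (PySem.List.pyRange 0 (nb:Int) 1).foldl _ [] = (PySem.List.pyRange 0 (nb:Int) 1).foldl _ []
  apply PySem.List.foldl_congr_mem
  intro qs bit hbit
  obtain ⟨hb0, hbnb⟩ := (PySem.List.mem_pyRange_one).mp hbit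
  have hblt : bit.toNat < nb := by omega
  apply PySem.List.foldl_congr_mem
  intro qs' _ _
  have hnodup : (F bit.toNat).Nodup := by
    rw [hFdef]; exact List.Nodup.filter _ (PySem.List.nodup_pyRange_one 1 (N+1))
  rw [hSA bit hb0, if_pos (hFne bit.toNat hblt), htable bit.toNat hblt]
  simp only [PySem.Set.ofList_eq_self_of_nodup _ hnodup]
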